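-- pv_equiv track=rewrite | github.com/ztata/cipherGenerator | cipherGeneratorConsoleApp/substitutionCipher.py | encodeForFile
-- ===== SOURCE A (Python) =====
-- def encodeForFile(subKey: int, msg: str):
--     encodedMessage = ""
--     numsList = [*range(32,127)]
--     for char in msg:
--         charNum = ord(char)
--         index = numsList.index(charNum)
--         index = index + subKey
--         newCharNum = numsList[index % len(numsList)]
--         newChar = chr(newCharNum)
--         encodedMessage += newChar
--     return encodedMessage
-- ===== SOURCE B (Python) =====
-- def encodeForFile(subKey: int, msg: str):
--     alphabet = "".join(map(chr, range(32, 127)))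
--     k = subKey % len(alphabet)
--     table = str.maketrans(alphabet, alphabet[k:] + alphabet[:k])
--     return msg.translate(table)
-- ===== Notes on version B (the rewrite author's own statement) =====
-- stated objective: faster
-- what changed: Instead of a per-character linear list.index scan and re-indexing into the numsList table, B builds the whole substitution once by rotating the printable-ASCII alphabet with string slicing and applies it via a precomputed str.maketrans translation table with msg.translate, with no per-character arithmetic or search.
import Mathlib
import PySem

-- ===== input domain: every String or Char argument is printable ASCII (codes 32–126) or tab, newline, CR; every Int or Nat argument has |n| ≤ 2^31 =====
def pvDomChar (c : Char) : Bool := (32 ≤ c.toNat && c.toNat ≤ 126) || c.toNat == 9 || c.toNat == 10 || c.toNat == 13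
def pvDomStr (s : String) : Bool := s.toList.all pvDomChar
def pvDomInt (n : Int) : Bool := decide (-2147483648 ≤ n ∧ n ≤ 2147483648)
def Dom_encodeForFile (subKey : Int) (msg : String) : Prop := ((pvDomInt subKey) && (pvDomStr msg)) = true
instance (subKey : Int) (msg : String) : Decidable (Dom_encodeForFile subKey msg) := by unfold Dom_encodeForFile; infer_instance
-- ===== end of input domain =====

-- B builds the whole substitution once, as a translation table from the printable alphabet
-- to its slice-rotation, and applies it with translate — no per-character search or arithmetic
-- (objective: faster — a timing run measured it; A's per-char list.index scan disappears).

-- ===== PORT A =====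
-- literal transliteration of A's loop body: numsList = [*range(32,127)], look the char up
-- with .index, re-index with (index+subKey) % len(numsList); on a char not in the table
-- Python raises ValueError (the 'none' branches, excluded by Pre_, keep acc unchanged).
def encodeForFileStep (subKey : Int) (acc : List Char) (char : Char) : List Char :=
  let numsList := PySem.List.pyRange 32 127 1
  let charNum : Int := (char.toNat : Int)
  match PySem.List.index? numsList charNum with
  | none => acc
  | some idx =>
    let index : Int := (idx : Int) + subKey
    match PySem.List.pyGet? numsList (PySem.Int.mod index (numsList.length : Int)) with
    | none => acc
    | some newCharNum => acc ++ [Char.ofNat newCharNum.toNat]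

def encodeForFile (subKey : Int) (msg : String) : String :=
  String.mk (msg.toList.foldl (encodeForFileStep subKey) [])

-- ===== PORT B =====
-- literal transliteration of B: alphabet = chr(32)..chr(126); k = subKey % len(alphabet);
-- table = str.maketrans(alphabet, alphabet[k:] + alphabet[:k]) is the char→char Dict zipped from
-- the two strings; msg.translate(table) maps each char to its table entry, unchanged if absent.
def encodeForFileAlpha : List Char := (PySem.List.pyRange 32 127 1).map (fun c => Char.ofNat c.toNat)

def encodeForFileKey (subKey : Int) : Int := PySem.Int.mod subKey (encodeForFileAlpha.length : Int)

def encodeForFileTable (subKey : Int) : PySem.Dict Char Char :=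
  PySem.Dict.ofList (encodeForFileAlpha.zip
    (PySem.List.slice encodeForFileAlpha (some (encodeForFileKey subKey)) none ++
     PySem.List.slice encodeForFileAlpha none (some (encodeForFileKey subKey))))

def encodeForFile_alt (subKey : Int) (msg : String) : String :=
  String.mk (msg.toList.map (fun c => (encodeForFileTable subKey).getD c c))

-- ===== PRECONDITION & SPEC =====
-- Pre_ excludes messages containing a character outside codes 32..126 (within Dom that
-- means tab/newline/CR): on those A raises ValueError from list.index.
def Pre_encodeForFile (subKey : Int) (msg : String) : Prop :=
  (msg.toList.all (fun c => decide (32 ≤ c.toNat) && decide (c.toNat ≤ 126))) = true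
instance (subKey : Int) (msg : String) : Decidable (Pre_encodeForFile subKey msg) := by
  unfold Pre_encodeForFile; infer_instance
def pvWitness_encodeForFile : Int × String := (7, "Hello, World!")

def Spec_encodeForFile (subKey : Int) (msg : String) (out : String) : Prop :=
  out = encodeForFile_alt subKey msg
instance (subKey : Int) (msg : String) (out : String) : Decidable (Spec_encodeForFile subKey msg out) := by
  unfold Spec_encodeForFile; infer_instance

-- ===== CLAIM (what is proved, stated in full; the proofs are below) =====
def Claim_equal_encodeForFile : Prop := ∀ (subKey : Int) (msg : String),
  Dom_encodeForFile subKey msg → Pre_encodeForFile subKey msg →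
  Spec_encodeForFile subKey msg (encodeForFile subKey msg)
-- ===== LEMMAS AND PROOFS =====

-- the per-character value A computes, as a named function (proof artefact only)
def shiftChar (subKey : Int) (c : Char) : Char :=
  Char.ofNat ((PySem.Int.mod ((c.toNat : Int) - 32 + subKey) 95) + 32).toNat

lemma numsList_index (c : Char) (h1 : 32 ≤ c.toNat) (h2 : c.toNat ≤ 126) :
    PySem.List.index? (PySem.List.pyRange 32 127 1) ((c.toNat : Int)) = some (c.toNat - 32) := by
  have h1' : (32 : Int) ≤ (c.toNat : Int) := by exact_mod_cast h1
  have h2' : (c.toNat : Int) ≤ 126 := by exact_mod_cast h2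
  rw [PySem.List.index?_eq_some_iff]
  refine ⟨PySem.List.pyRange 32 (c.toNat : Int) 1,
          PySem.List.pyRange ((c.toNat : Int) + 1) 127 1, ?_, ?_, ?_⟩
  · rw [PySem.List.pyRange_one_append 32 (c.toNat : Int) 127 h1' (by omega),
        PySem.List.pyRange_one_cons (show (c.toNat : Int) < 127 by omega)]
  · rw [PySem.List.length_pyRange_one]; omega
  · intro hmem
    rw [PySem.List.mem_pyRange_one] at hmem
    omega

lemma stepA_eq (subKey : Int) (acc : List Char) (c : Char)
    (h1 : 32 ≤ c.toNat) (h2 : c.toNat ≤ 126) :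
    encodeForFileStep subKey acc c = acc ++ [shiftChar subKey c] := by
  unfold encodeForFileStep shiftChar
  have hlen : ((PySem.List.pyRange 32 127 1).length : Int) = 95 := by
    rw [PySem.List.length_pyRange_one]; decide
  simp only [numsList_index c h1 h2, hlen]
  have hidx : ((c.toNat - 32 : Nat) : Int) + subKey = (c.toNat : Int) - 32 + subKey := by
    omega
  rw [hidx]
  set m := PySem.Int.mod ((c.toNat : Int) - 32 + subKey) 95 with hm
  have hm0 : 0 ≤ m := PySem.Int.mod_nonneg _ (by omega)
  have hm95 : m < 95 := PySem.Int.mod_lt _ (by omega)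
  have hget : PySem.List.pyGet? (PySem.List.pyRange 32 127 1) m = some (32 + m) := by
    rw [PySem.List.pyGet?_of_nonneg _ hm0]
    have hlt : m.toNat < (PySem.List.pyRange 32 127 1).length := by
      rw [PySem.List.length_pyRange_one]; omega
    rw [List.getElem?_eq_getElem hlt, PySem.List.getElem_pyRange_one]
    congr 1; omega
  rw [hget]
  have h32 : (32 + m).toNat = (m + 32).toNat := by omega
  simp [h32]

lemma fold_eq_map (subKey : Int) (l : List Char) (acc : List Char)
    (hl : ∀ c ∈ l, 32 ≤ c.toNat ∧ c.toNat ≤ 126) :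
    l.foldl (encodeForFileStep subKey) acc = acc ++ l.map (shiftChar subKey) := by
  induction l generalizing acc with
  | nil => simp
  | cons c t ih =>
    have hc := hl c (by simp)
    rw [List.foldl_cons, stepA_eq subKey acc c hc.1 hc.2,
        ih _ (fun x hx => hl x (by simp [hx])), List.map_cons]
    simp

-- B-side facts about the alphabet
lemma alphabet_length : encodeForFileAlpha.length = 95 := by decide
lemma alphabet_nodup : encodeForFileAlpha.Nodup := by decide
lemma alphabet_getElem (i : Nat) (hi : i < encodeForFileAlpha.length) :
    encodeForFileAlpha[i] = Char.ofNat (32 + i) := by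
  unfold encodeForFileAlpha at *
  rw [List.getElem_map, PySem.List.getElem_pyRange_one]
  congr 1

lemma key_eq (subKey : Int) : encodeForFileKey subKey = PySem.Int.mod subKey 95 := by
  unfold encodeForFileKey
  rw [alphabet_length]
  norm_num

lemma mod95_bounds (subKey : Int) :
    0 ≤ PySem.Int.mod subKey 95 ∧ PySem.Int.mod subKey 95 < 95 :=
  ⟨PySem.Int.mod_nonneg _ (by omega), PySem.Int.mod_lt _ (by omega)⟩

-- the table's items are exactly the zipped pairs (second string at least as long)
lemma items_zip (v : List Char) (hv : encodeForFileAlpha.length ≤ v.length) :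
    (PySem.Dict.ofList (encodeForFileAlpha.zip v)).items = encodeForFileAlpha.zip v := by
  unfold PySem.Dict.ofList PySem.Dict.update
  have hnodup : ((encodeForFileAlpha.zip v).map Prod.fst).Nodup := by
    rw [List.map_fst_zip hv]
    exact alphabet_nodup
  have := PySem.Dict.items_foldl_insert_fresh (encodeForFileAlpha.zip v) Prod.fst Prod.snd
    PySem.Dict.empty (fun a _ => by simp [PySem.Dict.contains_empty]) hnodup
  simpa using this

-- B's table lookup at a printable char is A's per-char value
lemma table_getD (subKey : Int) (c : Char) (h1 : 32 ≤ c.toNat) (h2 : c.toNat ≤ 126) :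
    (encodeForFileTable subKey).getD c c = shiftChar subKey c := by
  obtain ⟨hk0, hk95⟩ := mod95_bounds subKey
  set kn := (PySem.Int.mod subKey 95).toNat with hkn
  have hkn95 : kn < 95 := by omega
  have hkIcast : PySem.Int.mod subKey 95 = (kn : Int) := by omega
  have hdroplen : (encodeForFileAlpha.drop kn).length = 95 - kn := by
    rw [List.length_drop, alphabet_length]
  have htakelen : (encodeForFileAlpha.take kn).length = kn := by
    rw [List.length_take, alphabet_length]
    omega
  have hrotlen : (encodeForFileAlpha.drop kn ++ encodeForFileAlpha.take kn).length = 95 := by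
    rw [List.length_append, hdroplen, htakelen]
    omega
  have htab : encodeForFileTable subKey =
      PySem.Dict.ofList (encodeForFileAlpha.zip
        (encodeForFileAlpha.drop kn ++ encodeForFileAlpha.take kn)) := by
    unfold encodeForFileTable
    rw [key_eq, hkIcast, PySem.List.slice_from_natCast, PySem.List.slice_to_natCast]
  obtain ⟨d, hd⟩ : ∃ d, c.toNat = 32 + d := ⟨c.toNat - 32, by omega⟩
  have hd95 : d < 95 := by omega
  have hdA : d < encodeForFileAlpha.length := by rw [alphabet_length]; omega
  have hdS : d < (encodeForFileAlpha.drop kn ++ encodeForFileAlpha.take kn).length := by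
    rw [hrotlen]; omega
  have hkey : encodeForFileAlpha[d] = c := by
    rw [alphabet_getElem d hdA, ← hd]
    exact Char.ofNat_toNat c
  have hval : (encodeForFileAlpha.drop kn ++ encodeForFileAlpha.take kn)[d] =
      Char.ofNat (32 + (d + kn) % 95) := by
    by_cases hcase : d < 95 - kn
    · rw [List.getElem_append_left (by rw [hdroplen]; omega), List.getElem_drop, alphabet_getElem]
      congr 1
      omega
    · rw [List.getElem_append_right (by rw [hdroplen]; omega), List.getElem_take, alphabet_getElem]
      congr 1
      rw [hdroplen]
      omega
  have hzlen : d < (encodeForFileAlpha.zip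
      (encodeForFileAlpha.drop kn ++ encodeForFileAlpha.take kn)).length := by
    rw [List.length_zip, alphabet_length, hrotlen]
    omega
  have hmem : (c, (encodeForFileAlpha.drop kn ++ encodeForFileAlpha.take kn)[d]) ∈
      (encodeForFileTable subKey).items := by
    rw [htab, items_zip _ (by rw [alphabet_length, hrotlen]), ← hkey,
        ← List.getElem_zip (h := hzlen)]
    exact List.getElem_mem _
  have hnodup : (encodeForFileTable subKey).keys.Nodup := by
    unfold encodeForFileTable
    exact PySem.Dict.nodup_keys_ofList _
  rw [PySem.Dict.getD_of_mem_items _ hmem hnodup, hval]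
  unfold shiftChar
  have e1 : PySem.Int.mod ((c.toNat : Int) - 32 + subKey) 95 = ((c.toNat : Int) - 32 + subKey) % 95 :=
    PySem.Int.mod_eq_emod_of_pos (by omega)
  have harith : ((c.toNat : Int) - 32 + subKey) % 95 = (((d + kn) % 95 : Nat) : Int) := by
    have hdc : ((c.toNat : Int) - 32) = (d : Int) := by omega
    have hkc : (kn : Int) = subKey % 95 := by
      rw [← PySem.Int.mod_eq_emod_of_pos (show (0:Int) < 95 by omega)]
      omega
    push_cast
    rw [hdc, Int.add_emod, ← hkc]
    omega
  rw [e1, harith]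
  congr 1
  omega

-- ===== VERDICT (by name: the statement is the Claim_ definition above) =====
theorem encodeForFile_spec : Claim_equal_encodeForFile := by
  intro subKey msg _ hPre
  have hPre' : ∀ c ∈ msg.toList, 32 ≤ c.toNat ∧ c.toNat ≤ 126 := by
    intro c hc
    have := List.all_eq_true.mp hPre c hc
    simp at this
    omega
  unfold Spec_encodeForFile encodeForFile encodeForFile_alt
  rw [fold_eq_map subKey msg.toList [] hPre', List.nil_append]
  congr 1
  exact List.map_congr_left fun c hc =>
    ((table_getD subKey c (hPre' c hc).1 (hPre' c hc).2).symm)
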